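-- pv_equiv track=rewrite | github.com/Domik44/BP | scrapers/scraper_Plzen.py | convert_commas
-- ===== SOURCE A (Python) =====
-- def convert_commas(str):
--     priznak = False
--     newStr = ""
--
--     for i in str:
--         if i == '(' or i == '[':
--             i = '('
--             priznak = not priznak
--             # continue
--         elif i == ')' or i == ']':
--             i = ')'
--             priznak = not priznak
--             # continue
--         if i == ',' and priznak:
--             i = ';'
--         newStr += i
--
--     return newStr
-- ===== SOURCE B (Python) =====
-- def convert_commas(str):
--     out = []
--     inside = False
--     s = str
--     while True:
--         k = 0
--         while k < len(s) and s[k] not in '()[]':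
--             k += 1
--         seg = s[:k]
--         out.append(seg.replace(',', ';') if inside else seg)
--         if k == len(s):
--             return ''.join(out)
--         out.append('(' if s[k] in '([' else ')')
--         inside = not inside
--         s = s[k + 1:]
-- ===== Notes on version B (the rewrite author's own statement) =====
-- stated objective: alternative
-- what changed: Replaces A's per-character scan with a toggle flag by a chunk-wise loop: skip to the next bracket, bulk-replace commas in the whole segment when inside, emit the normalized bracket, and join the pieces.
import Mathlib
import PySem

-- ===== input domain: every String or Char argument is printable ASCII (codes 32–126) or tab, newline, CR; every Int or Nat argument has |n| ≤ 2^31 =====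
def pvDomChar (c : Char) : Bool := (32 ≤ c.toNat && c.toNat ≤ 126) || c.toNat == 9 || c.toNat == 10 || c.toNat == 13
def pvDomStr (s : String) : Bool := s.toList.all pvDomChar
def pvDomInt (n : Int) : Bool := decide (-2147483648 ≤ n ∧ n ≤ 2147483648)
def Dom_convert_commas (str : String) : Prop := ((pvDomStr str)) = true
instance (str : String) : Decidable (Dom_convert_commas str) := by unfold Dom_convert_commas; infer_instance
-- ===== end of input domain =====

-- B replaces A's per-character toggle scan by a chunk-wise loop (skip to next bracket,
-- bulk comma-replace of the segment when inside brackets); alternative decomposition, same cost.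


-- ===== PORT A =====
-- one step of A's for-loop: state = (priznak, newStr as List Char)
def stepA (st : Bool × List Char) (i : Char) : Bool × List Char :=
  if i = '(' ∨ i = '[' then (!st.1, st.2 ++ ['('])
  else if i = ')' ∨ i = ']' then (!st.1, st.2 ++ [')'])
  else if i = ',' ∧ st.1 = true then (st.1, st.2 ++ [';'])
  else (st.1, st.2 ++ [i])

def convert_commas (str : String) : String :=
  String.ofList (str.toList.foldl stepA (false, [])).2

-- ===== PORT B =====
def isBrB (c : Char) : Bool := c = '(' || c = '[' || c = ')' || c = ']'

-- the inner `while k < len(s) and s[k] not in '()[]'` scan plus the slices s[:k], s[k:]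
-- are exactly takeWhile / dropWhile of the non-bracket predicate;
-- seg.replace(',', ';') on single chars is exactly the map below
def goB (out : List Char) (inside : Bool) (s : List Char) : List Char :=
  let seg := s.takeWhile (fun c => !isBrB c)
  let rest := s.dropWhile (fun c => !isBrB c)
  let out2 := out ++ (if inside then seg.map (fun c => if c = ',' then ';' else c) else seg)
  if hr : rest = [] then out2
  else
    goB (out2 ++ [if rest.head hr = '(' ∨ rest.head hr = '[' then '(' else ')'])
      (!inside) rest.tail
termination_by s.length
decreasing_by
  have h1 : (s.dropWhile (fun c => !isBrB c)).length ≤ s.length :=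
    List.length_dropWhile_le _ _
  have h2 : 0 < (s.dropWhile (fun c => !isBrB c)).length :=
    List.length_pos_of_ne_nil hr
  simp [List.length_tail]
  omega

def convert_commas_alt (str : String) : String :=
  String.ofList (goB [] false str.toList)

-- ===== PRECONDITION & SPEC =====
def Spec_convert_commas (str : String) (out : String) : Prop := out = convert_commas_alt str
instance (str : String) (out : String) : Decidable (Spec_convert_commas str out) := by unfold Spec_convert_commas; infer_instance

-- ===== CLAIM (what is proved, stated in full; the proofs are below) =====
def Claim_equal_convert_commas : Prop := ∀ (str : String), Dom_convert_commas str → Spec_convert_commas str (convert_commas str)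

-- ===== LEMMAS AND PROOFS =====

lemma goB_nil (out : List Char) (p : Bool) : goB out p [] = out := by
  rw [goB]; simp

lemma goB_cons_br (out : List Char) (p : Bool) (c : Char) (tl : List Char)
    (hc : isBrB c = true) :
    goB out p (c :: tl)
      = goB (out ++ [if c = '(' ∨ c = '[' then '(' else ')']) (!p) tl := by
  rw [goB]
  simp [hc]

lemma goB_cons_nbr (out : List Char) (p : Bool) (c : Char) (tl : List Char)
    (hc : isBrB c = false) :
    goB out p (c :: tl)
      = goB (out ++ [if c = ',' ∧ p = true then ';' else c]) p tl := by
  rw [goB, goB]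
  simp only [List.takeWhile_cons, List.dropWhile_cons, hc, Bool.not_false]
  cases p <;> simp [List.append_assoc]

lemma mainAB : ∀ (s : List Char) (p : Bool) (out : List Char),
    (s.foldl stepA (p, out)).2 = goB out p s := by
  intro s
  induction s with
  | nil => intro p out; simp [goB_nil]
  | cons c tl ih =>
    intro p out
    by_cases hb : isBrB c = true
    · have hb' : (c = '(' ∨ c = '[') ∨ (c = ')' ∨ c = ']') := by
        have h0 := hb
        simp [isBrB, Bool.or_eq_true] at h0
        tauto
      rcases hb' with h | h
      · have e : stepA (p, out) c = (!p, out ++ ['(']) := by simp [stepA, h]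
        rw [goB_cons_br out p c tl hb]
        simp only [List.foldl_cons]
        rw [e, ih, if_pos h]
      · have hno : ¬(c = '(' ∨ c = '[') := by rcases h with h | h <;> subst h <;> decide
        have e : stepA (p, out) c = (!p, out ++ [')']) := by simp [stepA, hno, h]
        rw [goB_cons_br out p c tl hb]
        simp only [List.foldl_cons]
        rw [e, ih, if_neg hno]
    · have hb' : isBrB c = false := by simpa using hb
      have h1 : ¬(c = '(' ∨ c = '[') := by
        intro h; apply hb; rcases h with h | h <;> simp [isBrB, h]
      have h2 : ¬(c = ')' ∨ c = ']') := by
        intro h; apply hb; rcases h with h | h <;> simp [isBrB, h]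
      rw [goB_cons_nbr out p c tl hb']
      by_cases hcm : c = ',' ∧ p = true
      · simp [List.foldl_cons, stepA, hcm, ih]
      · simp [List.foldl_cons, stepA, h1, h2, hcm, ih]

-- ===== VERDICT (by name: the statement is the Claim_ definition above) =====
theorem convert_commas_spec : Claim_equal_convert_commas := by
  intro str _
  unfold Spec_convert_commas convert_commas convert_commas_alt
  rw [mainAB]
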